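-- pv_equiv track=rewrite | github.com/msh1273/Programmers_codingTest_python | AddPlusMinus.py | solution
-- ===== SOURCE A (Python) =====
-- def solution(absolutes, signs):
--     sum = 0
--     for i in range(len(absolutes)):
--         if (signs[i] == False):
--             sum -= absolutes[i]
--         else:
--             sum += absolutes[i]
--
--     return sum
-- ===== SOURCE B (Python) =====
-- def solution(absolutes, signs):
--     total = sum(absolutes)
--     neg = sum(a for a, s in zip(absolutes, signs) if not s)
--     return total - 2 * neg
-- ===== Notes on version B (the rewrite author's own statement) =====
-- stated objective: idiomatic
-- what changed: Replaces the indexed per-element add/subtract branch with an unconditional total sum plus a zip-based filtered sum of the negative entries, returning total - 2*neg with no indexing at all.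
import Mathlib
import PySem

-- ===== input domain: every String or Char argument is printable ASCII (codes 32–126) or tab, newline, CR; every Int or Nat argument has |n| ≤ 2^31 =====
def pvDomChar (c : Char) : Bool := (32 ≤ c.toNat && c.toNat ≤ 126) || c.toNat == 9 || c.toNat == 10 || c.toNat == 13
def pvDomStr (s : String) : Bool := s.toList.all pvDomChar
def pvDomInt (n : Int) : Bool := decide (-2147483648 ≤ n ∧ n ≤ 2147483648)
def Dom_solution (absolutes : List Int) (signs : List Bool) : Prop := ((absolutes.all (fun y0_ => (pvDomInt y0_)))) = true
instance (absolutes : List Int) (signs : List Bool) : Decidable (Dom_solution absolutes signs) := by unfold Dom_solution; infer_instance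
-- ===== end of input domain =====

-- B replaces A's indexed add/subtract branch by an unconditional total sum plus a
-- zip-based filtered sum of the negative entries (total - 2*neg); same cost, different decomposition.

-- ===== PORT A =====
-- for i in range(len(absolutes)): if signs[i] == False: sum -= absolutes[i] else: sum += absolutes[i]
def solution (absolutes : List Int) (signs : List Bool) : Int :=
  (PySem.List.pyRange 0 (PySem.List.len absolutes)).foldl
    (fun s i =>
      if PySem.List.pyGetD signs i false == false then s - PySem.List.pyGetD absolutes i 0
      else s + PySem.List.pyGetD absolutes i 0) 0

-- ===== PORT B =====
-- total = sum(absolutes); neg = sum(a for a, s in zip(absolutes, signs) if not s); total - 2*neg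
def solution_alt (absolutes : List Int) (signs : List Bool) : Int :=
  let total := absolutes.sum
  let neg := (absolutes.zip signs).foldl (fun acc p => if p.2 then acc else acc + p.1) 0
  total - 2 * neg

-- ===== PRECONDITION & SPEC =====
-- A raises IndexError on signs[i] when signs is shorter than absolutes; Pre_ excludes exactly those inputs (B's zip would instead truncate and return a value there).
def Pre_solution (absolutes : List Int) (signs : List Bool) : Prop :=
  absolutes.length ≤ signs.length
instance (absolutes : List Int) (signs : List Bool) : Decidable (Pre_solution absolutes signs) := by
  unfold Pre_solution; infer_instance
def pvWitness_solution : List Int × List Bool := ([4, 7, 12], [true, false, true])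

def Spec_solution (absolutes : List Int) (signs : List Bool) (out : Int) : Prop := out = solution_alt absolutes signs
instance (absolutes : List Int) (signs : List Bool) (out : Int) : Decidable (Spec_solution absolutes signs out) := by unfold Spec_solution; infer_instance

-- ===== CLAIM (what is proved, stated in full; the proofs are below) =====
def Claim_equal_solution : Prop := ∀ (absolutes : List Int) (signs : List Bool), Dom_solution absolutes signs → Pre_solution absolutes signs → Spec_solution absolutes signs (solution absolutes signs)
-- ===== LEMMAS AND PROOFS =====

-- Core identity: the signed sum A computes over indices equals total - 2 * (zip-filtered negative sum).
lemma range_signed_sum (a : List Int) :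
    ∀ (s : List Bool), a.length ≤ s.length →
    ((List.range a.length).map
        (fun k => if s.getD k false == false then -(a.getD k 0) else a.getD k 0)).sum
      = a.sum - 2 * ((a.zip s).map (fun p => if p.2 then 0 else p.1)).sum := by
  induction a with
  | nil => intro s _; simp
  | cons x a ih =>
      intro s hs
      cases s with
      | nil => simp at hs
      | cons b s' =>
          simp only [List.length_cons, List.range_succ_eq_map, List.map_cons, List.map_map,
            List.sum_cons, List.zip_cons_cons, Function.comp_def, List.getD_cons_succ,
            List.getD_cons_zero]
          rw [ih s' (by simpa using hs)]
          cases b <;> simp <;> ring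

-- ===== VERDICT (by name: the statement is the Claim_ definition above) =====
theorem solution_spec : Claim_equal_solution := by
  intro absolutes signs _ hpre
  unfold Spec_solution solution solution_alt
  have hA : (fun (s i : Int) =>
      if PySem.List.pyGetD signs i false == false then s - PySem.List.pyGetD absolutes i 0
      else s + PySem.List.pyGetD absolutes i 0)
    = (fun s i => s + (if PySem.List.pyGetD signs i false == false
        then -(PySem.List.pyGetD absolutes i 0) else PySem.List.pyGetD absolutes i 0)) := by
    funext s i; split <;> ring
  have hB : (fun (acc : Int) (p : Int × Bool) => if p.2 then acc else acc + p.1)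
    = (fun acc p => acc + (if p.2 then 0 else p.1)) := by
    funext acc p; split <;> ring
  rw [hA, hB, PySem.List.foldl_add, PySem.List.foldl_add]
  have hlen : PySem.List.len absolutes = (absolutes.length : Int) := rfl
  have hrange : PySem.List.pyRange 0 (PySem.List.len absolutes) 1
      = (List.range absolutes.length).map (fun k : ℕ => (k : Int)) := by
    rw [PySem.List.pyRange_one, hlen]
    have h0 : ((absolutes.length : Int) - 0).toNat = absolutes.length := by omega
    rw [h0]
    exact List.map_congr_left (fun k _ => by omega)
  rw [hrange, List.map_map]
  have hpt : ((List.range absolutes.length).map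
      ((fun i => if PySem.List.pyGetD signs i false == false
          then -(PySem.List.pyGetD absolutes i 0) else PySem.List.pyGetD absolutes i 0)
        ∘ (fun k : ℕ => (k : Int)))).sum
      = ((List.range absolutes.length).map
        (fun k => if signs.getD k false == false
          then -(absolutes.getD k 0) else absolutes.getD k 0)).sum := by
    congr 1
    apply List.map_congr_left
    intro k _
    simp [Function.comp, PySem.List.pyGetD_natCast]
  rw [hpt, range_signed_sum absolutes signs hpre]
  ring
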